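-- pv_equiv track=rewrite | github.com/siyanhu/crowdsourcing | crowd/A1_device_calibration/MathUtil.py | topIs
-- ===== SOURCE A (Python) =====
-- def topIs(a):
--     topIs = []
--     if len(a) == 0:
--         return topIs
--
--     max = a[0]
--     for i in range(len(a)):
--         if a[i] > max:
--             max = a[i]
--             topIs = [i]
--         elif a[i] == max:
--             topIs.append(i)
--     return topIs
-- ===== SOURCE B (Python) =====
-- def topIs(a):
--     if not a:
--         return []
--     m = max(a)
--     return [i for i, x in enumerate(a) if x == m]
-- ===== Notes on version B (the rewrite author's own statement) =====
-- stated objective: simpler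
-- what changed: Replaces the fused running-max loop that rebuilds/extends the index list in lockstep with a two-pass version: compute max(a) once, then collect matching indices with an enumerate comprehension.
import Mathlib
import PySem

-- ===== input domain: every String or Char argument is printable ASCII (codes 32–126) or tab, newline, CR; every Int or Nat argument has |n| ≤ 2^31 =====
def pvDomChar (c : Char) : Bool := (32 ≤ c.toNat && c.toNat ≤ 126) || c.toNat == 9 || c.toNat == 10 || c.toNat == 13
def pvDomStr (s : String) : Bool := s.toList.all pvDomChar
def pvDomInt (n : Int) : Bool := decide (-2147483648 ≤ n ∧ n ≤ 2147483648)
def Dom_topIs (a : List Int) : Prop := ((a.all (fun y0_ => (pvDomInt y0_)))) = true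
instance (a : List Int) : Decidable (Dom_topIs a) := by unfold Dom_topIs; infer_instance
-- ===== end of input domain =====

-- B replaces A's fused running-max loop by a two-pass version (max once, then collect indices); objective: simpler.

-- ===== PORT A =====
def topIs (a : List Int) : List Int :=
  if a.length = 0 then []
  else
    ((PySem.List.pyRange 0 (PySem.List.len a) 1).foldl
      (fun (s : Int × List Int) i =>
        let x := PySem.List.pyGetD a i 0
        if x > s.1 then (x, [i])
        else if x = s.1 then (s.1, s.2 ++ [i])
        else s)
      (PySem.List.pyGetD a 0 0, ([] : List Int))).2

-- ===== PORT B =====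
def topIs_alt (a : List Int) : List Int :=
  match PySem.List.max? a (fun x => x) with
  | none => []
  | some m => ((PySem.List.enumerate a 0).filter (fun p => p.2 == m)).map (·.1)

-- ===== PRECONDITION & SPEC =====
def Spec_topIs (a : List Int) (out : List Int) : Prop := out = topIs_alt a
instance (a : List Int) (out : List Int) : Decidable (Spec_topIs a out) := by unfold Spec_topIs; infer_instance

-- ===== CLAIM (what is proved, stated in full; the proofs are below) =====
def Claim_equal_topIs : Prop := ∀ (a : List Int), Dom_topIs a → Spec_topIs a (topIs a)

-- ===== LEMMAS AND PROOFS =====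

/-- A's loop body as a function of the (index, value) pair. -/
def stepA (s : Int × List Int) (p : Int × Int) : Int × List Int :=
  if p.2 > s.1 then (p.2, [p.1])
  else if p.2 = s.1 then (s.1, s.2 ++ [p.1])
  else s

/-- Invariant of A's loop: over any enumerated suffix, the fold computes the running max
    and, unless the max never improved, exactly the indices of the final max. -/
lemma loop_inv (l : List Int) (s mx : Int) (acc : List Int) :
    (PySem.List.enumerate l s).foldl stepA (mx, acc) =
      (l.foldl max mx,
       (if l.foldl max mx = mx then acc else []) ++
         ((PySem.List.enumerate l s).filter (fun p => p.2 == l.foldl max mx)).map (·.1)) := by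
  induction l generalizing s mx acc with
  | nil => simp [PySem.List.enumerate]
  | cons x t ih =>
    have hle : max mx x ≤ t.foldl max (max mx x) := (PySem.List.le_foldl_max t (max mx x)).1
    rw [PySem.List.enumerate_cons]
    simp only [List.foldl_cons, List.foldl]
    have hstep : stepA (mx, acc) (s, x) =
        if x > mx then (x, [s]) else if x = mx then (mx, acc ++ [s]) else (mx, acc) := by
      simp [stepA]
    by_cases h1 : x > mx
    · rw [hstep]; simp only [if_pos h1]
      rw [ih (s+1) x [s]]
      have hmax : max mx x = x := by omega
      have hF : t.foldl max (max mx x) = t.foldl max x := by rw [hmax]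
      have hne : t.foldl max x ≠ mx := by
        have := (PySem.List.le_foldl_max t x).1; omega
      simp only [List.foldl_cons, hmax]
      rw [List.filter_cons]
      by_cases h2 : x = t.foldl max x
      · simp [← h2, hne]
        intro hx; exact absurd hx (by omega)
      · have : (x == t.foldl max x) = false := by simp [h2]
        simp [this, hne]
        omega
    · rw [hstep]; simp only [if_neg h1]
      by_cases h2 : x = mx
      · simp only [if_pos h2]
        rw [ih (s+1) mx (acc ++ [s])]
        have hmax : max mx x = mx := by omega
        simp only [List.foldl_cons, hmax]
        rw [List.filter_cons]
        by_cases h3 : t.foldl max mx = mx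
        · have : (x == t.foldl max mx) = true := by simp [h2, h3]
          simp [this, h3, h2]
        · have : (x == t.foldl max mx) = false := by
            simp only [beq_eq_false_iff_ne, ne_eq]; omega
          simp [this, h3, h2]
          rw [if_neg fun h => h3 h.symm]
      · simp only [if_neg h2]
        rw [ih (s+1) mx acc]
        have hmax : max mx x = mx := by omega
        simp only [List.foldl_cons, hmax]
        rw [List.filter_cons]
        have hFge : mx ≤ t.foldl max mx := (PySem.List.le_foldl_max t mx).1
        have : (x == t.foldl max mx) = false := by
          simp only [beq_eq_false_iff_ne, ne_eq]; omega
        simp [this]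

-- ===== VERDICT (by name: the statement is the Claim_ definition above) =====
theorem topIs_spec : Claim_equal_topIs := by
  intro a _
  unfold Spec_topIs topIs topIs_alt
  cases a with
  | nil => simp [PySem.List.max?]
  | cons h t =>
    have hlen : (h :: t).length ≠ 0 := by simp
    rw [if_neg hlen]
    rw [PySem.List.max?_id_cons]
    have hEnum := PySem.List.enumerate_eq_map_pyRange (xs := h :: t) (d := (0 : Int))
    have hfold :
        (PySem.List.pyRange 0 (PySem.List.len (h :: t)) 1).foldl
          (fun (s : Int × List Int) i =>
            let x := PySem.List.pyGetD (h :: t) i 0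
            if x > s.1 then (x, [i])
            else if x = s.1 then (s.1, s.2 ++ [i])
            else s)
          (PySem.List.pyGetD (h :: t) 0 0, ([] : List Int)) =
        (PySem.List.enumerate (h :: t) 0).foldl stepA (h, ([] : List Int)) := by
      rw [hEnum, List.foldl_map]
      simp [stepA, PySem.List.pyGetD_zero_cons]
    rw [hfold, loop_inv]
    have hF : (h :: t).foldl max h = t.foldl max h := by
      simp [List.foldl_cons]
    rw [hF]
    split_ifs <;> simp
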